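-- pv_equiv track=rewrite | github.com/xiajingkang17/mvp | components/common/inline_math.py | has_unbalanced_inline_math_delimiters
-- ===== SOURCE A (Python) =====
-- def has_unbalanced_inline_math_delimiters(text: str) -> bool:
--     in_math = False
--     i = 0
--     while i < len(text):
--         ch = text[i]
--         if ch == "\\" and i + 1 < len(text) and text[i + 1] == "$":
--             i += 2
--             continue
--         if ch == "$":
--             in_math = not in_math
--         i += 1
--     return in_math
-- ===== SOURCE B (Python) =====
-- def has_unbalanced_inline_math_delimiters(text: str) -> bool:
--     return text.replace("\\$", "").count("$") % 2 == 1
-- ===== Notes on version B (the rewrite author's own statement) =====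
-- stated objective: faster
-- what changed: Replaces A's single Python-level index-tracking scan (interleaved escape-skip and boolean toggle per character) with two C-level standard-library passes: str.replace strips every escaped dollar, then str.count counts the remaining dollar signs and the result is that count's parity.
import Mathlib
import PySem

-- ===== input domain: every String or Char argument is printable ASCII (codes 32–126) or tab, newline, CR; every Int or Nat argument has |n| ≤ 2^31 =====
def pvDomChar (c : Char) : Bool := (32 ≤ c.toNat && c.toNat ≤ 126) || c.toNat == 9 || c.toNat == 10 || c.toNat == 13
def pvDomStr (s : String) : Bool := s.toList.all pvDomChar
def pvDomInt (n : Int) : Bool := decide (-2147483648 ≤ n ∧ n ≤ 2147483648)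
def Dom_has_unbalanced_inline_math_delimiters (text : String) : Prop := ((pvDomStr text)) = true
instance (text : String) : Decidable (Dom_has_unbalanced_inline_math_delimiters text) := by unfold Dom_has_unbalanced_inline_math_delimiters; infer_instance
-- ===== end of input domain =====

-- B replaces A's single index-tracking toggle scan with a strip-escapes pass (str.replace)
-- followed by a count-and-parity test; measurably faster by constant factor (C-level passes).

-- ===== PORT A =====
-- A's while loop over the index, consuming "\$" two at a time and toggling on "$",
-- as the obvious structural recursion over the remaining characters with the same state.
def pvGoA : List Char → Bool → Bool
  | [], in_math => in_math
  | '\\' :: '$' :: rest', in_math => pvGoA rest' in_math   -- ch == "\\" and text[i+1] == "$": i += 2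
  | ch :: rest, in_math => pvGoA rest (if ch == '$' then !in_math else in_math)

def has_unbalanced_inline_math_delimiters (text : String) : Bool :=
  pvGoA text.toList false

-- ===== PORT B =====
def has_unbalanced_inline_math_delimiters_alt (text : String) : Bool :=
  (PySem.Str.count (PySem.Str.replace text "\\$" "") "$") % 2 == 1

-- ===== PRECONDITION & SPEC =====
def Spec_has_unbalanced_inline_math_delimiters (text : String) (out : Bool) : Prop := out = has_unbalanced_inline_math_delimiters_alt text
instance (text : String) (out : Bool) : Decidable (Spec_has_unbalanced_inline_math_delimiters text out) := by unfold Spec_has_unbalanced_inline_math_delimiters; infer_instance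

-- ===== CLAIM (what is proved, stated in full; the proofs are below) =====
def Claim_equal_has_unbalanced_inline_math_delimiters : Prop := ∀ (text : String), Dom_has_unbalanced_inline_math_delimiters text → Spec_has_unbalanced_inline_math_delimiters text (has_unbalanced_inline_math_delimiters text)

-- ===== LEMMAS AND PROOFS =====

-- what PySem.Chars.replace cs "\$" "" computes, as a plain recursion
def pvStrip : List Char → List Char
  | [] => []
  | '\\' :: '$' :: t => pvStrip t
  | c :: t => c :: pvStrip t

theorem pvPrefix_iff (l : List Char) :
    (['\\', '$'] : List Char).isPrefixOf l = true ↔ ∃ t, l = '\\' :: '$' :: t := by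
  rw [List.isPrefixOf_iff_prefix]
  constructor
  · rintro ⟨t, rfl⟩; exact ⟨t, rfl⟩
  · rintro ⟨t, rfl⟩; exact ⟨t, rfl⟩

theorem pvStrip_cons_of_not_prefix (c : Char) (t : List Char)
    (h : (['\\', '$'] : List Char).isPrefixOf (c :: t) = false) :
    pvStrip (c :: t) = c :: pvStrip t := by
  conv_lhs => rw [pvStrip.eq_def]
  split
  · simp_all
  · exfalso
    rename_i heq
    have : (['\\', '$'] : List Char).isPrefixOf (c :: t) = true := by
      rw [pvPrefix_iff]
      exact ⟨_, heq⟩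
    simp [this] at h
  · rename_i heq
    injection heq with h1 h2
    subst h1; subst h2
    rfl

theorem pvReplace_go_eq (fuel : ℕ) (l acc : List Char) (h : l.length ≤ fuel) :
    PySem.Chars.replace.go ['\\', '$'] [] fuel l acc = acc.reverse ++ pvStrip l := by
  induction fuel generalizing l acc with
  | zero =>
    have : l = [] := List.eq_nil_of_length_eq_zero (Nat.le_zero.mp h)
    subst this
    simp [PySem.Chars.replace.go, pvStrip]
  | succ n ih =>
    match l with
    | [] => simp [PySem.Chars.replace.go, pvStrip]
    | c :: t =>
      simp only [PySem.Chars.replace.go]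
      by_cases hp : (['\\', '$'] : List Char).isPrefixOf (c :: t) = true
      · obtain ⟨t', ht⟩ := (pvPrefix_iff _).mp hp
        cases ht
        rw [if_pos hp]
        simp only [List.length_cons] at h
        simp only [List.length_cons, List.length_nil, List.drop_succ_cons, List.drop_zero,
          List.reverse_nil, List.nil_append]
        rw [ih t' acc (by omega)]
        simp [pvStrip]
      · rw [if_neg hp]
        simp only [List.length_cons, Nat.succ_le_succ_iff] at h
        rw [ih _ _ h, pvStrip_cons_of_not_prefix c t (Bool.eq_false_iff.mpr hp)]
        simp

theorem pvCount_go_eq (fuel : ℕ) (l : List Char) (acc : ℕ) (h : l.length ≤ fuel) :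
    PySem.Chars.count.go ['$'] fuel l acc = acc + l.count '$' := by
  induction fuel generalizing l acc with
  | zero =>
    have : l = [] := List.eq_nil_of_length_eq_zero (Nat.le_zero.mp h)
    subst this
    simp [PySem.Chars.count.go]
  | succ n ih =>
    match l with
    | [] => simp [PySem.Chars.count.go]
    | c :: t =>
      simp only [PySem.Chars.count.go]
      simp only [List.length_cons, Nat.succ_le_succ_iff] at h
      by_cases hc : c = '$'
      · subst hc
        rw [if_pos (by simp [List.isPrefixOf])]
        rw [ih _ _ (by simpa using h)]
        simp
        omega
      · rw [if_neg (by simp [List.isPrefixOf]; exact fun hh => hc hh.symm)]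
        rw [ih _ _ h]
        simp [hc]

theorem pvReplace_eq (cs : List Char) :
    PySem.Chars.replace cs ['\\', '$'] [] = pvStrip cs := by
  simp only [PySem.Chars.replace, List.isEmpty]
  rw [pvReplace_go_eq cs.length cs [] le_rfl]
  simp

theorem pvCount_eq (cs : List Char) :
    PySem.Chars.count cs ['$'] = cs.count '$' := by
  simp only [PySem.Chars.count, List.isEmpty]
  rw [pvCount_go_eq cs.length cs 0 le_rfl]
  simp

theorem pvGoA_eq (cs : List Char) (b : Bool) :
    pvGoA cs b = xor b ((pvStrip cs).count '$' % 2 == 1) := by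
  fun_induction pvGoA cs b with
  | case1 b => simp [pvStrip]
  | case2 rest' b ih =>
    rw [ih]; simp [pvStrip]
  | case3 ch rest b hne ih =>
    rw [ih]
    have hp : (['\\', '$'] : List Char).isPrefixOf (ch :: rest) = false := by
      rw [Bool.eq_false_iff]
      intro hc
      obtain ⟨t', ht⟩ := (pvPrefix_iff _).mp hc
      injection ht with h1 h2
      exact hne t' h1 h2
    rw [pvStrip_cons_of_not_prefix ch rest hp]
    by_cases hch : ch = '$'
    · subst hch
      simp only [List.count_cons, beq_self_eq_true, if_pos]
      have := Nat.mod_two_eq_zero_or_one ((pvStrip rest).count '$')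
      rcases this with h1 | h1
      · have h2 : ((pvStrip rest).count '$' + 1) % 2 = 1 := by omega
        simp [h1, h2]
      · have h2 : ((pvStrip rest).count '$' + 1) % 2 = 0 := by omega
        simp [h1, h2]
    · simp [hch]

-- ===== VERDICT (by name: the statement is the Claim_ definition above) =====
theorem has_unbalanced_inline_math_delimiters_spec : Claim_equal_has_unbalanced_inline_math_delimiters := by
  intro text _
  unfold Spec_has_unbalanced_inline_math_delimiters
  unfold has_unbalanced_inline_math_delimiters has_unbalanced_inline_math_delimiters_alt
  rw [pvGoA_eq]
  have hc : PySem.Str.count (PySem.Str.replace text "\\$" "") "$"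
      = (pvStrip text.toList).count '$' := by
    rw [PySem.Str.count_eq, PySem.Str.toList_replace]
    show PySem.Chars.count (PySem.Chars.replace text.toList ['\\', '$'] []) ['$'] = _
    rw [pvReplace_eq, pvCount_eq]
  rw [hc]
  simp
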